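-- pv_equiv track=rewrite | github.com/ipvive/bridgerules | python/fastgame/wrapper.py | comparison_score
-- ===== SOURCE A (Python) =====
-- def comparison_score(diff, scoring):
--     if scoring == "Matchpoints":
--         if diff > 0:
--             return 1, None
--         elif diff < 0:
--             return -1, None
--         else:
--             return 0, None
--     elif scoring == "total_points":
--         return diff, None
--     elif scoring == "IMPs":
--         for i, cutoff in enumerate(_IMP_table):
--             if abs(diff) < cutoff:
--                 if diff > 0:
--                     return i, None
--                 else:
--                     return -i, None
--         return None, "score diff impossibly large"
--     else:
--         return None, "unknown scoring"
--
-- _IMP_table = [ 20, 50, 90, 130, 170, 220, 270, 320, 370, 430, 500, 600, 750,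
--         900, 1100, 1300, 1500, 1750, 2000, 2250, 2500, 3000, 3500, 5000, 1e99 ]
-- ===== SOURCE B (Python) =====
-- _IMP_table = [ 20, 50, 90, 130, 170, 220, 270, 320, 370, 430, 500, 600, 750,
--         900, 1100, 1300, 1500, 1750, 2000, 2250, 2500, 3000, 3500, 5000, 1e99 ]
--
-- def comparison_score(diff, scoring):
--     if scoring == "Matchpoints":
--         return (1 if diff > 0 else -1 if diff < 0 else 0), None
--     if scoring == "total_points":
--         return diff, None
--     if scoring == "IMPs":
--         # binary search: lo = index of first cutoff strictly greater than abs(diff)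
--         x = abs(diff)
--         lo, hi = 0, len(_IMP_table)
--         while lo < hi:
--             mid = (lo + hi) // 2
--             if x < _IMP_table[mid]:
--                 hi = mid
--             else:
--                 lo = mid + 1
--         if lo == len(_IMP_table):
--             return None, "score diff impossibly large"
--         return (lo if diff > 0 else -lo), None
--     return None, "unknown scoring"
-- ===== Notes on version B (the rewrite author's own statement) =====
-- stated objective: idiomatic
-- what changed: The IMPs branch's sequential enumerate-scan over the cutoff table is replaced by a bisect_right-style binary search (hand-written, since A imports nothing) over the same sorted table; the other scoring branches are folded into conditional expressions.
import Mathlib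
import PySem

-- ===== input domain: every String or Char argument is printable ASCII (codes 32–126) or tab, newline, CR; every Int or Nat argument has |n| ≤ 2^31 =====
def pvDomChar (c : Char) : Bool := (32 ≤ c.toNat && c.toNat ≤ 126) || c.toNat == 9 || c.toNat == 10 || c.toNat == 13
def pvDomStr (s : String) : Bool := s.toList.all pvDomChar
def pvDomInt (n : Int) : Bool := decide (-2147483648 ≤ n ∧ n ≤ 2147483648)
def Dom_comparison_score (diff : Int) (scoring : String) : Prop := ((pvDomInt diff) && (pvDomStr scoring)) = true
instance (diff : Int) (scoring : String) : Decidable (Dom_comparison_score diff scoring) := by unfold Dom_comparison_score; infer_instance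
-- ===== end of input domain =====

-- B replaces A's sequential scan of the IMP cutoff table by a binary search (hand-written
-- bisect_right loop); same results, idiomatic lookup on a sorted table.


-- ===== PORT A =====
-- _IMP_table; the final Python entry 1e99 is ported as 10^99: for any |diff| ≤ 2^31 the
-- comparison |diff| < 1e99 and |diff| < 10^99 agree (both true), so the port is exact on Dom.
def pvImpTable : List Int := [20, 50, 90, 130, 170, 220, 270, 320, 370, 430, 500, 600, 750,
  900, 1100, 1300, 1500, 1750, 2000, 2250, 2500, 3000, 3500, 5000, 10^99]

-- A's 'for i, cutoff in enumerate(_IMP_table)' loop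
def pvImpsScanA (i : Nat) (tbl : List Int) (diff : Int) : Option Int × Option String :=
  match tbl with
  | [] => (none, some "score diff impossibly large")
  | c :: rest =>
    if |diff| < c then
      if diff > 0 then (some (i : Int), none) else (some (-(i : Int)), none)
    else pvImpsScanA (i + 1) rest diff

def comparison_score (diff : Int) (scoring : String) : Option Int × Option String :=
  if scoring = "Matchpoints" then
    if diff > 0 then (some 1, none)
    else if diff < 0 then (some (-1), none)
    else (some 0, none)
  else if scoring = "total_points" then (some diff, none)
  else if scoring = "IMPs" then pvImpsScanA 0 pvImpTable diff
  else (none, some "unknown scoring")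

-- ===== PORT B =====
-- Source B's own module-level _IMP_table (same values; 1e99 again ported as 10^99, exact on Dom)
def pvImpTableB : List Int := [20, 50, 90, 130, 170, 220, 270, 320, 370, 430, 500, 600, 750,
  900, 1100, 1300, 1500, 1750, 2000, 2250, 2500, 3000, 3500, 5000, 10^99]

-- B's hand-written bisect_right while-loop
def pvBisect (a : List Int) (x : Int) (lo hi : Nat) : Nat :=
  if lo < hi then
    let mid := (lo + hi) / 2
    if x < a.getD mid 0 then pvBisect a x lo mid else pvBisect a x (mid + 1) hi
  else lo
termination_by hi - lo
decreasing_by all_goals omega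

def comparison_score_alt (diff : Int) (scoring : String) : Option Int × Option String :=
  if scoring = "Matchpoints" then
    (some (if diff > 0 then 1 else if diff < 0 then -1 else 0), none)
  else if scoring = "total_points" then (some diff, none)
  else if scoring = "IMPs" then
    let x := |diff|
    let lo := pvBisect pvImpTableB x 0 pvImpTableB.length
    if lo = pvImpTableB.length then (none, some "score diff impossibly large")
    else (some (if diff > 0 then (lo : Int) else -(lo : Int)), none)
  else (none, some "unknown scoring")

-- ===== PRECONDITION & SPEC =====
def Spec_comparison_score (diff : Int) (scoring : String) (out : Option Int × Option String) : Prop := out = comparison_score_alt diff scoring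
instance (diff : Int) (scoring : String) (out : Option Int × Option String) : Decidable (Spec_comparison_score diff scoring out) := by unfold Spec_comparison_score; infer_instance

-- ===== CLAIM (what is proved, stated in full; the proofs are below) =====
def Claim_equal_comparison_score : Prop := ∀ (diff : Int) (scoring : String), Dom_comparison_score diff scoring → Spec_comparison_score diff scoring (comparison_score diff scoring)

-- ===== LEMMAS AND PROOFS =====

set_option maxRecDepth 8000 in
set_option maxHeartbeats 4000000 in
lemma bisect_tree (x : Int) : pvBisect pvImpTableB x 0 25 = (if x < 750 then (if x < 270 then (if x < 130 then (if x < 50 then (if x < 20 then 0 else 1) else (if x < 90 then 2 else 3)) else (if x < 220 then (if x < 170 then 4 else 5) else 6)) else (if x < 430 then (if x < 370 then (if x < 320 then 7 else 8) else 9) else (if x < 600 then (if x < 500 then 10 else 11) else 12))) else (if x < 2250 then (if x < 1500 then (if x < 1100 then (if x < 900 then 13 else 14) else (if x < 1300 then 15 else 16)) else (if x < 2000 then (if x < 1750 then 17 else 18) else 19)) else (if x < 3500 then (if x < 3000 then (if x < 2500 then 20 else 21) else 22) else (if x < 1000000000000000000000000000000000000000000000000000000000000000000000000000000000000000000000000000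 then (if x < 5000 then 23 else 24) else 25)))) := by
  simp [pvBisect, pvImpTableB, List.getD]

set_option maxRecDepth 8000 in
set_option maxHeartbeats 4000000 in
lemma scan_tree (diff : Int) : pvImpsScanA 0 pvImpTable diff = (if |diff| < 20 then (if diff > 0 then (some (0 : Int), none) else (some (-(0 : Int)), none)) else (if |diff| < 50 then (if diff > 0 then (some (1 : Int), none) else (some (-(1 : Int)), none)) else (if |diff| < 90 then (if diff > 0 then (some (2 : Int), none) else (some (-(2 : Int)), none)) else (if |diff| < 130 then (if diff > 0 then (some (3 : Int), none) else (some (-(3 : Int)), none)) else (if |diff| < 170 then (if diff > 0 then (some (4 : Int), none) else (some (-(4 : Int)), none)) else (if |diff| < 220 then (if diff > 0 then (some (5 : Int), none) else (some (-(5 : Int)), none)) else (if |diff| < 270 then (if diff > 0 then (some (6 : Int), none) else (some (-(6 : Int)), none)) else (if |diff| < 320 then (if diff > 0 then (some (7 : Int), none) else (some (-(7 : Int)), none)) else (if |diff| < 370 then (if diff > 0 then (some (8 : Int), none) else (some (-(8 : Int)), none)) else (if |diff| < 430 then (if diff > 0 then (some (9 : Int), none) else (some (-(9 : Int)), none)) else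 (if |diff| < 500 then (if diff > 0 then (some (10 : Int), none) else (some (-(10 : Int)), none)) else (if |diff| < 600 then (if diff > 0 then (some (11 : Int), none) else (some (-(11 : Int)), none)) else (if |diff| < 750 then (if diff > 0 then (some (12 : Int), none) else (some (-(12 : Int)), none)) else (if |diff| < 900 then (if diff > 0 then (some (13 : Int), none) else (some (-(13 : Int)), none)) else (if |diff| < 1100 then (if diff > 0 then (some (14 : Int), none) else (some (-(14 : Int)), none)) else (if |diff| < 1300 then (if diff > 0 then (some (15 : Int), none) else (some (-(15 : Int)), none)) else (if |diff| < 1500 then (if diff > 0 then (some (16 : Int), none) else (some (-(16 : Int)), none)) else (if |diff| < 1750 then (if diff > 0 then (some (17 : Int), none) else (some (-(17 : Int)), none)) else (if |diff| < 2000 then (if diff > 0 then (some (18 : Int), none) else (some (-(18 : Int)), none)) else (if |diff| < 2250 then (if diff > 0 then (some (19 : Int), none) else (some (-(19 : Int)), none)) else (if |diff| < 2500 then (if diff > 0 then (some (20 : Int), none) else (some (-(20 : Int)), none)) else (if |diff| < 3000 then (if diff > 0 then (some (21 : Int), none) else (some (-(21 : Int)), none)) else (if |diff| < 3500 then (if diff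 > 0 then (some (22 : Int), none) else (some (-(22 : Int)), none)) else (if |diff| < 5000 then (if diff > 0 then (some (23 : Int), none) else (some (-(23 : Int)), none)) else (if |diff| < 1000000000000000000000000000000000000000000000000000000000000000000000000000000000000000000000000000 then (if diff > 0 then (some (24 : Int), none) else (some (-(24 : Int)), none)) else ((none : Option Int), some "score diff impossibly large")))))))))))))))))))))))))) := by
  rfl

set_option maxRecDepth 8000 in
set_option maxHeartbeats 4000000 in
-- the IMPs branch: linear scan of the cutoff table = binary search over it (for every diff)
lemma imps_branch_eq (diff : Int) :
    pvImpsScanA 0 pvImpTable diff =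
      (let lo := pvBisect pvImpTableB |diff| 0 25;
       if lo = 25 then (none, some "score diff impossibly large")
       else (some (if diff > 0 then (lo : Int) else -(lo : Int)), none)) := by
  rw [scan_tree, bisect_tree]
  by_cases c0 : |diff| < 20
  · have f0_0 : |diff| < 750 := by omega
    have f0_1 : |diff| < 270 := by omega
    have f0_2 : |diff| < 130 := by omega
    have f0_3 : |diff| < 50 := by omega
    have f0_4 : |diff| < 20 := by omega
    simp [c0, f0_0, f0_1, f0_2, f0_3, f0_4]
    try split_ifs <;> first | rfl | norm_num
  by_cases c1 : |diff| < 50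
  · have f1_0 : |diff| < 750 := by omega
    have f1_1 : |diff| < 270 := by omega
    have f1_2 : |diff| < 130 := by omega
    have f1_3 : |diff| < 50 := by omega
    have f1_4 : ¬ |diff| < 20 := by omega
    simp [c1, c0, f1_0, f1_1, f1_2, f1_3, f1_4]
    try split_ifs <;> first | rfl | norm_num
  by_cases c2 : |diff| < 90
  · have f2_0 : |diff| < 750 := by omega
    have f2_1 : |diff| < 270 := by omega
    have f2_2 : |diff| < 130 := by omega
    have f2_3 : ¬ |diff| < 50 := by omega
    have f2_4 : |diff| < 90 := by omega
    simp [c2, c0, c1, f2_0, f2_1, f2_2, f2_3, f2_4]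
    try split_ifs <;> first | rfl | norm_num
  by_cases c3 : |diff| < 130
  · have f3_0 : |diff| < 750 := by omega
    have f3_1 : |diff| < 270 := by omega
    have f3_2 : |diff| < 130 := by omega
    have f3_3 : ¬ |diff| < 50 := by omega
    have f3_4 : ¬ |diff| < 90 := by omega
    simp [c3, c0, c1, c2, f3_0, f3_1, f3_2, f3_3, f3_4]
    try split_ifs <;> first | rfl | norm_num
  by_cases c4 : |diff| < 170
  · have f4_0 : |diff| < 750 := by omega
    have f4_1 : |diff| < 270 := by omega
    have f4_2 : ¬ |diff| < 130 := by omega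
    have f4_3 : |diff| < 220 := by omega
    have f4_4 : |diff| < 170 := by omega
    simp [c4, c0, c1, c2, c3, f4_0, f4_1, f4_2, f4_3, f4_4]
    try split_ifs <;> first | rfl | norm_num
  by_cases c5 : |diff| < 220
  · have f5_0 : |diff| < 750 := by omega
    have f5_1 : |diff| < 270 := by omega
    have f5_2 : ¬ |diff| < 130 := by omega
    have f5_3 : |diff| < 220 := by omega
    have f5_4 : ¬ |diff| < 170 := by omega
    simp [c5, c0, c1, c2, c3, c4, f5_0, f5_1, f5_2, f5_3, f5_4]
    try split_ifs <;> first | rfl | norm_num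
  by_cases c6 : |diff| < 270
  · have f6_0 : |diff| < 750 := by omega
    have f6_1 : |diff| < 270 := by omega
    have f6_2 : ¬ |diff| < 130 := by omega
    have f6_3 : ¬ |diff| < 220 := by omega
    simp [c6, c0, c1, c2, c3, c4, c5, f6_0, f6_1, f6_2, f6_3]
    try split_ifs <;> first | rfl | norm_num
  by_cases c7 : |diff| < 320
  · have f7_0 : |diff| < 750 := by omega
    have f7_1 : ¬ |diff| < 270 := by omega
    have f7_2 : |diff| < 430 := by omega
    have f7_3 : |diff| < 370 := by omega
    have f7_4 : |diff| < 320 := by omega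
    simp [c7, c0, c1, c2, c3, c4, c5, c6, f7_0, f7_1, f7_2, f7_3, f7_4]
    try split_ifs <;> first | rfl | norm_num
  by_cases c8 : |diff| < 370
  · have f8_0 : |diff| < 750 := by omega
    have f8_1 : ¬ |diff| < 270 := by omega
    have f8_2 : |diff| < 430 := by omega
    have f8_3 : |diff| < 370 := by omega
    have f8_4 : ¬ |diff| < 320 := by omega
    simp [c8, c0, c1, c2, c3, c4, c5, c6, c7, f8_0, f8_1, f8_2, f8_3, f8_4]
    try split_ifs <;> first | rfl | norm_num
  by_cases c9 : |diff| < 430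
  · have f9_0 : |diff| < 750 := by omega
    have f9_1 : ¬ |diff| < 270 := by omega
    have f9_2 : |diff| < 430 := by omega
    have f9_3 : ¬ |diff| < 370 := by omega
    simp [c9, c0, c1, c2, c3, c4, c5, c6, c7, c8, f9_0, f9_1, f9_2, f9_3]
    try split_ifs <;> first | rfl | norm_num
  by_cases c10 : |diff| < 500
  · have f10_0 : |diff| < 750 := by omega
    have f10_1 : ¬ |diff| < 270 := by omega
    have f10_2 : ¬ |diff| < 430 := by omega
    have f10_3 : |diff| < 600 := by omega
    have f10_4 : |diff| < 500 := by omega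
    simp [c10, c0, c1, c2, c3, c4, c5, c6, c7, c8, c9, f10_0, f10_1, f10_2, f10_3, f10_4]
    try split_ifs <;> first | rfl | norm_num
  by_cases c11 : |diff| < 600
  · have f11_0 : |diff| < 750 := by omega
    have f11_1 : ¬ |diff| < 270 := by omega
    have f11_2 : ¬ |diff| < 430 := by omega
    have f11_3 : |diff| < 600 := by omega
    have f11_4 : ¬ |diff| < 500 := by omega
    simp [c11, c0, c1, c2, c3, c4, c5, c6, c7, c8, c9, c10, f11_0, f11_1, f11_2, f11_3, f11_4]
    try split_ifs <;> first | rfl | norm_num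
  by_cases c12 : |diff| < 750
  · have f12_0 : |diff| < 750 := by omega
    have f12_1 : ¬ |diff| < 270 := by omega
    have f12_2 : ¬ |diff| < 430 := by omega
    have f12_3 : ¬ |diff| < 600 := by omega
    simp [c12, c0, c1, c2, c3, c4, c5, c6, c7, c8, c9, c10, c11, f12_0, f12_1, f12_2, f12_3]
    try split_ifs <;> first | rfl | norm_num
  by_cases c13 : |diff| < 900
  · have f13_0 : ¬ |diff| < 750 := by omega
    have f13_1 : |diff| < 2250 := by omega
    have f13_2 : |diff| < 1500 := by omega
    have f13_3 : |diff| < 1100 := by omega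
    have f13_4 : |diff| < 900 := by omega
    simp [c13, c0, c1, c2, c3, c4, c5, c6, c7, c8, c9, c10, c11, c12, f13_0, f13_1, f13_2, f13_3, f13_4]
    try split_ifs <;> first | rfl | norm_num
  by_cases c14 : |diff| < 1100
  · have f14_0 : ¬ |diff| < 750 := by omega
    have f14_1 : |diff| < 2250 := by omega
    have f14_2 : |diff| < 1500 := by omega
    have f14_3 : |diff| < 1100 := by omega
    have f14_4 : ¬ |diff| < 900 := by omega
    simp [c14, c0, c1, c2, c3, c4, c5, c6, c7, c8, c9, c10, c11, c12, c13, f14_0, f14_1, f14_2, f14_3, f14_4]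
    try split_ifs <;> first | rfl | norm_num
  by_cases c15 : |diff| < 1300
  · have f15_0 : ¬ |diff| < 750 := by omega
    have f15_1 : |diff| < 2250 := by omega
    have f15_2 : |diff| < 1500 := by omega
    have f15_3 : ¬ |diff| < 1100 := by omega
    have f15_4 : |diff| < 1300 := by omega
    simp [c15, c0, c1, c2, c3, c4, c5, c6, c7, c8, c9, c10, c11, c12, c13, c14, f15_0, f15_1, f15_2, f15_3, f15_4]
    try split_ifs <;> first | rfl | norm_num
  by_cases c16 : |diff| < 1500
  · have f16_0 : ¬ |diff| < 750 := by omega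
    have f16_1 : |diff| < 2250 := by omega
    have f16_2 : |diff| < 1500 := by omega
    have f16_3 : ¬ |diff| < 1100 := by omega
    have f16_4 : ¬ |diff| < 1300 := by omega
    simp [c16, c0, c1, c2, c3, c4, c5, c6, c7, c8, c9, c10, c11, c12, c13, c14, c15, f16_0, f16_1, f16_2, f16_3, f16_4]
    try split_ifs <;> first | rfl | norm_num
  by_cases c17 : |diff| < 1750
  · have f17_0 : ¬ |diff| < 750 := by omega
    have f17_1 : |diff| < 2250 := by omega
    have f17_2 : ¬ |diff| < 1500 := by omega
    have f17_3 : |diff| < 2000 := by omega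
    have f17_4 : |diff| < 1750 := by omega
    simp [c17, c0, c1, c2, c3, c4, c5, c6, c7, c8, c9, c10, c11, c12, c13, c14, c15, c16, f17_0, f17_1, f17_2, f17_3, f17_4]
    try split_ifs <;> first | rfl | norm_num
  by_cases c18 : |diff| < 2000
  · have f18_0 : ¬ |diff| < 750 := by omega
    have f18_1 : |diff| < 2250 := by omega
    have f18_2 : ¬ |diff| < 1500 := by omega
    have f18_3 : |diff| < 2000 := by omega
    have f18_4 : ¬ |diff| < 1750 := by omega
    simp [c18, c0, c1, c2, c3, c4, c5, c6, c7, c8, c9, c10, c11, c12, c13, c14, c15, c16, c17, f18_0, f18_1, f18_2, f18_3, f18_4]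
    try split_ifs <;> first | rfl | norm_num
  by_cases c19 : |diff| < 2250
  · have f19_0 : ¬ |diff| < 750 := by omega
    have f19_1 : |diff| < 2250 := by omega
    have f19_2 : ¬ |diff| < 1500 := by omega
    have f19_3 : ¬ |diff| < 2000 := by omega
    simp [c19, c0, c1, c2, c3, c4, c5, c6, c7, c8, c9, c10, c11, c12, c13, c14, c15, c16, c17, c18, f19_0, f19_1, f19_2, f19_3]
    try split_ifs <;> first | rfl | norm_num
  by_cases c20 : |diff| < 2500
  · have f20_0 : ¬ |diff| < 750 := by omega
    have f20_1 : ¬ |diff| < 2250 := by omega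
    have f20_2 : |diff| < 3500 := by omega
    have f20_3 : |diff| < 3000 := by omega
    have f20_4 : |diff| < 2500 := by omega
    simp [c20, c0, c1, c2, c3, c4, c5, c6, c7, c8, c9, c10, c11, c12, c13, c14, c15, c16, c17, c18, c19, f20_0, f20_1, f20_2, f20_3, f20_4]
    try split_ifs <;> first | rfl | norm_num
  by_cases c21 : |diff| < 3000
  · have f21_0 : ¬ |diff| < 750 := by omega
    have f21_1 : ¬ |diff| < 2250 := by omega
    have f21_2 : |diff| < 3500 := by omega
    have f21_3 : |diff| < 3000 := by omega
    have f21_4 : ¬ |diff| < 2500 := by omega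
    simp [c21, c0, c1, c2, c3, c4, c5, c6, c7, c8, c9, c10, c11, c12, c13, c14, c15, c16, c17, c18, c19, c20, f21_0, f21_1, f21_2, f21_3, f21_4]
    try split_ifs <;> first | rfl | norm_num
  by_cases c22 : |diff| < 3500
  · have f22_0 : ¬ |diff| < 750 := by omega
    have f22_1 : ¬ |diff| < 2250 := by omega
    have f22_2 : |diff| < 3500 := by omega
    have f22_3 : ¬ |diff| < 3000 := by omega
    simp [c22, c0, c1, c2, c3, c4, c5, c6, c7, c8, c9, c10, c11, c12, c13, c14, c15, c16, c17, c18, c19, c20, c21, f22_0, f22_1, f22_2, f22_3]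
    try split_ifs <;> first | rfl | norm_num
  by_cases c23 : |diff| < 5000
  · have f23_0 : ¬ |diff| < 750 := by omega
    have f23_1 : ¬ |diff| < 2250 := by omega
    have f23_2 : ¬ |diff| < 3500 := by omega
    have f23_3 : |diff| < 1000000000000000000000000000000000000000000000000000000000000000000000000000000000000000000000000000 := by omega
    have f23_4 : |diff| < 5000 := by omega
    simp [c23, c0, c1, c2, c3, c4, c5, c6, c7, c8, c9, c10, c11, c12, c13, c14, c15, c16, c17, c18, c19, c20, c21, c22, f23_0, f23_1, f23_2, f23_3, f23_4]
    try split_ifs <;> first | rfl | norm_num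
  by_cases c24 : |diff| < 1000000000000000000000000000000000000000000000000000000000000000000000000000000000000000000000000000
  · have f24_0 : ¬ |diff| < 750 := by omega
    have f24_1 : ¬ |diff| < 2250 := by omega
    have f24_2 : ¬ |diff| < 3500 := by omega
    have f24_3 : |diff| < 1000000000000000000000000000000000000000000000000000000000000000000000000000000000000000000000000000 := by omega
    have f24_4 : ¬ |diff| < 5000 := by omega
    simp [c24, c0, c1, c2, c3, c4, c5, c6, c7, c8, c9, c10, c11, c12, c13, c14, c15, c16, c17, c18, c19, c20, c21, c22, c23, f24_0, f24_1, f24_2, f24_3, f24_4]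
    try split_ifs <;> first | rfl | norm_num
  have g0 : ¬ |diff| < 750 := by omega
  have g1 : ¬ |diff| < 2250 := by omega
  have g2 : ¬ |diff| < 3500 := by omega
  have g3 : ¬ |diff| < 1000000000000000000000000000000000000000000000000000000000000000000000000000000000000000000000000000 := by omega
  simp [c0, c1, c2, c3, c4, c5, c6, c7, c8, c9, c10, c11, c12, c13, c14, c15, c16, c17, c18, c19, c20, c21, c22, c23, c24, g0, g1, g2, g3]

-- ===== VERDICT (by name: the statement is the Claim_ definition above) =====
theorem comparison_score_spec : Claim_equal_comparison_score := by
  intro diff scoring _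
  unfold Spec_comparison_score comparison_score comparison_score_alt
  by_cases h1 : scoring = "Matchpoints"
  · simp only [h1, if_true]; split_ifs <;> rfl
  · by_cases h2 : scoring = "total_points"
    · simp [h1, h2]
    · by_cases h3 : scoring = "IMPs"
      · simp only [h1, h2, h3, if_false, if_true]
        have hl : pvImpTableB.length = 25 := by simp [pvImpTableB]
        rw [hl]
        exact imps_branch_eq diff
      · simp [h1, h2, h3]
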